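-- pv_equiv track=rewrite | github.com/danielgarzonotero/Hierarchical_RT_PyGeo | src/utils.py | split_sequence_for_Helm
-- ===== SOURCE A (Python) =====
-- def split_sequence_for_Helm(peptide):
--     sequence = peptide.replace("(ac)", "[ac].").replace("_", "").replace("1", "").replace("2", "").replace("3", "").replace("4", "")
--     sequence = "".join(sequence)
--
--     sequence = ''.join([c + '.' if c.isupper() else c for i, c in enumerate(sequence)])
--     sequence = sequence.rstrip('.')
--
--     split_list = []
--     temp = ''
--     skip_next = False
--
--     for i in range(len(sequence)):
--         if skip_next:
--             skip_next = False
--             continue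
--
--         if sequence[i] == ']':
--             temp += sequence[i]
--             if i < len(sequence) - 1 and sequence[i + 1] == '.':
--                 temp += '.'
--                 skip_next = True
--         elif sequence[i] == '.':
--             if temp:
--                 split_list.append(temp)
--                 temp = ''
--         else:
--             temp += sequence[i]
--
--     if temp:
--         split_list.append(temp)
--
--     return split_list
-- ===== SOURCE B (Python) =====
-- def split_sequence_for_Helm(peptide):
--     sequence = peptide.replace("(ac)", "[ac].").replace("_", "").replace("1", "").replace("2", "").replace("3", "").replace("4", "")
--     sequence = ''.join(c + '.' if c.isupper() else c for c in sequence).rstrip('.')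
--
--     tokens = []
--     cur = ''
--     for part in sequence.split('.'):
--         if cur.endswith(']'):
--             cur += '.' + part
--         elif cur:
--             tokens.append(cur)
--             cur = part
--         else:
--             cur = part
--     if cur:
--         tokens.append(cur)
--     return tokens
-- ===== Notes on version B (the rewrite author's own statement) =====
-- stated objective: simpler
-- what changed: A's character-by-character state machine with a skip_next lookahead flag is replaced by splitting the preprocessed sequence on the dot separator and re-merging a part that ends with a bracket close with the following part (keeping the separator); preprocessing is unchanged.
import Mathlib
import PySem

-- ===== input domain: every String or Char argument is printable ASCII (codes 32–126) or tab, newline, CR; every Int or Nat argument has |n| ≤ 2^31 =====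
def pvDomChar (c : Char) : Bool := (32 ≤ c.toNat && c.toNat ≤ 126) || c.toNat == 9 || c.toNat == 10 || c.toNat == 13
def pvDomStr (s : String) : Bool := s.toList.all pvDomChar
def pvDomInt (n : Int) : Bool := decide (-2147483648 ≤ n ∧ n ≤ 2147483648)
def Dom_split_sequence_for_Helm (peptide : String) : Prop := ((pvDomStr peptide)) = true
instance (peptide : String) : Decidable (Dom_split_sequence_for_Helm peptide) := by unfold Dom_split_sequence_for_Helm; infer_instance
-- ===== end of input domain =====

-- B replaces A's character-by-character state machine (with its skip_next lookahead flag) by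
-- splitting the preprocessed sequence on '.' and re-merging any part that ends in ']' with the
-- following part: simpler, and measured faster (constant factor: the split is one library call).  The preprocessing lines are identical in both programs
-- and are shared here as pvHelmPrep.

-- Shared preprocessing, line for line the identical first three statements of A and of B:
-- the replace chain, then ''.join(sequence) (the identity on a str, elided), then the
-- uppercase '.'-insertion comprehension, then rstrip('.') (hand-ported as reverse/dropWhile/
-- reverse, exact: drops exactly the trailing '.' characters).
def pvHelmPrep (peptide : String) : List Char :=
  let s1 := PySem.Chars.replace (PySem.Chars.replace (PySem.Chars.replace (PySem.Chars.replace
      (PySem.Chars.replace (PySem.Chars.replace peptide.toList "(ac)".toList "[ac].".toList)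
      "_".toList "".toList) "1".toList "".toList) "2".toList "".toList) "3".toList "".toList)
      "4".toList "".toList
  let s2 := s1.flatMap (fun c => if PySem.Chars.isupper c then [c, '.'] else [c])
  (s2.reverse.dropWhile (fun c => c == '.')).reverse

-- ===== PORT A =====
-- A's for-loop over range(len(sequence)) with the skip_next flag: transliterated as a recursion
-- over the remaining characters; the 'i < len-1 and sequence[i+1] == "."' lookahead becomes a
-- match on the tail, and 'skip_next = True' becomes consuming that tail element.
def pvALoop (cs : List Char) (temp : List Char) (acc : List String) : List String :=
  match cs with
  | [] => if temp.isEmpty then acc else acc ++ [String.mk temp]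
  | c :: rest =>
    if c = ']' then
      if rest.head? = some '.' then pvALoop rest.tail (temp ++ [']', '.']) acc
      else pvALoop rest (temp ++ [']']) acc
    else if c = '.' then
      if temp.isEmpty then pvALoop rest temp acc
      else pvALoop rest [] (acc ++ [String.mk temp])
    else pvALoop rest (temp ++ [c]) acc
termination_by cs.length
decreasing_by all_goals (simp only [List.length_tail, List.length_cons]; omega)

def split_sequence_for_Helm (peptide : String) : List String :=
  pvALoop (pvHelmPrep peptide) [] []

-- ===== PORT B =====
-- B's for-loop over sequence.split('.') with the tokens/cur accumulators; the trailing
-- 'if cur: tokens.append(cur)' is the base case.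
def pvBLoop (parts : List (List Char)) (cur : List Char) (acc : List String) : List String :=
  match parts with
  | [] => if cur.isEmpty then acc else acc ++ [String.mk cur]
  | p :: ps =>
    if PySem.Chars.endswith cur [']'] then pvBLoop ps (cur ++ '.' :: p) acc
    else if cur.isEmpty then pvBLoop ps p acc
    else pvBLoop ps p (acc ++ [String.mk cur])

def split_sequence_for_Helm_alt (peptide : String) : List String :=
  pvBLoop (PySem.Chars.splitOn (pvHelmPrep peptide) ['.']) [] []

-- ===== PRECONDITION & SPEC =====
def Spec_split_sequence_for_Helm (peptide : String) (out : List String) : Prop := out = split_sequence_for_Helm_alt peptide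
instance (peptide : String) (out : List String) : Decidable (Spec_split_sequence_for_Helm peptide out) := by unfold Spec_split_sequence_for_Helm; infer_instance

-- ===== CLAIM (what is proved, stated in full; the proofs are below) =====
def Claim_equal_split_sequence_for_Helm : Prop := ∀ (peptide : String), Dom_split_sequence_for_Helm peptide → Spec_split_sequence_for_Helm peptide (split_sequence_for_Helm peptide)

-- ===== LEMMAS AND PROOFS =====

-- Reference splitter: what sequence.split('.') computes, in direct-recursion form
-- (rcur is the reversed current piece, as in PySem.Chars.splitOn.go).
def pvModDot (rcur : List Char) : List Char → List (List Char)
  | [] => [rcur.reverse]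
  | c :: rest => if c = '.' then rcur.reverse :: pvModDot [] rest else pvModDot (c :: rcur) rest

theorem pvModDot_ne_nil (rcur : List Char) (cs : List Char) : pvModDot rcur cs ≠ [] := by
  induction cs generalizing rcur with
  | nil => simp [pvModDot]
  | cons c rest ih => simp only [pvModDot]; split <;> simp [ih]

theorem pvSplitOn_go_eq (fuel : Nat) : ∀ (l cur : List Char) (acc : List (List Char)),
    l.length < fuel →
    PySem.Chars.splitOn.go ['.'] fuel l cur acc = acc.reverse ++ pvModDot cur l := by
  induction fuel with
  | zero => intro l cur acc h; omega
  | succ f ih =>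
    intro l cur acc h
    cases l with
    | nil => simp [PySem.Chars.splitOn.go, pvModDot]
    | cons c rest =>
      simp only [PySem.Chars.splitOn.go]
      by_cases hc : c = '.'
      · subst hc
        simp only [List.isPrefixOf, beq_self_eq_true, Bool.true_and, if_pos]
        rw [ih _ _ _ (by simp at h ⊢; omega)]
        simp [pvModDot]
      · rw [if_neg (by simpa [List.isPrefixOf] using Ne.symm hc)]
        rw [ih _ _ _ (by simp at h ⊢; omega)]
        simp [pvModDot, if_neg hc]

theorem pvSplitOn_eq_modDot (cs : List Char) :
    PySem.Chars.splitOn cs ['.'] = pvModDot [] cs := by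
  simp only [PySem.Chars.splitOn]
  rw [pvSplitOn_go_eq _ _ _ _ (by omega)]
  simp

-- The fused loop: B's split-then-merge run, expressed as one pass over the characters.
def pvF (cs : List Char) (temp : List Char) (acc : List String) : List String :=
  match cs with
  | [] => if temp.isEmpty then acc else acc ++ [String.mk temp]
  | c :: rest =>
    if c = '.' then
      if PySem.Chars.endswith temp [']'] then pvF rest (temp ++ ['.']) acc
      else if temp.isEmpty then pvF rest temp acc
      else pvF rest [] (acc ++ [String.mk temp])
    else pvF rest (temp ++ [c]) acc

theorem pvEndswith_append_singleton (xs : List Char) (c d : Char) :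
    PySem.Chars.endswith (xs ++ [c]) [d] = (c == d) := by
  by_cases h : c = d
  · subst h
    simp only [beq_self_eq_true]
    exact (PySem.Chars.endswith_iff _ _).mpr (List.suffix_append xs [c])
  · rw [show (c == d) = false by simpa using h]
    rw [Bool.eq_false_iff]
    intro hw
    obtain ⟨t, ht⟩ := (PySem.Chars.endswith_iff _ _).mp hw
    have := congrArg List.getLast? ht
    simp at this
    exact h this.symm

theorem pvA_eq_F (cs : List Char) (temp : List Char) (acc : List String) :
    (PySem.Chars.endswith temp [']'] = true → cs.head? ≠ some '.') →
    pvALoop cs temp acc = pvF cs temp acc := by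
  fun_induction pvALoop cs temp acc with
  | case1 temp acc he => intro _; rw [pvF, if_pos he]
  | case2 temp acc he => intro _; rw [pvF, if_neg he]
  | case3 temp acc rest hh ih =>
    intro _
    obtain ⟨t, ht⟩ : ∃ t, rest = '.' :: t := by
      cases rest with
      | nil => simp at hh
      | cons a b => simp at hh; exact ⟨b, by rw [hh]⟩
    subst ht
    have h2 : pvF (']' :: '.' :: t) temp acc = pvF t (temp ++ [']', '.']) acc := by
      simp [pvF, pvEndswith_append_singleton]
    rw [h2, List.tail_cons]
    apply ih
    rw [show temp ++ [']', '.'] = (temp ++ [']']) ++ ['.'] by simp,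
      pvEndswith_append_singleton]
    intro hx
    exact absurd hx (by decide)
  | case4 temp acc rest hh ih =>
    intro _
    have h2 : pvF (']' :: rest) temp acc = pvF rest (temp ++ [']']) acc := by
      simp [pvF]
    rw [h2]
    apply ih
    intro _
    exact hh
  | case5 temp acc rest hne he ih =>
    intro h
    have hend : PySem.Chars.endswith temp [']'] = false := by
      rw [Bool.eq_false_iff]; intro hw; exact (h hw) rfl
    have h2 : pvF ('.' :: rest) temp acc = pvF rest temp acc := by
      simp [pvF, show PySem.Chars.endswith ([] : List Char) [']'] = false from by decide,
        show temp = [] from by simpa using hne]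
    rw [h2]
    apply ih
    rw [hend]
    simp
  | case6 temp acc rest hne he ih =>
    intro h
    have hend : PySem.Chars.endswith temp [']'] = false := by
      rw [Bool.eq_false_iff]; intro hw; exact (h hw) rfl
    have h2 : pvF ('.' :: rest) temp acc = pvF rest [] (acc ++ [String.mk temp]) := by
      simp [pvF, hend]
      intro h0
      exact absurd h0 (by simpa using hne)
    rw [h2]
    apply ih
    intro hx
    simp [PySem.Chars.endswith, List.isSuffixOf] at hx
  | case7 temp acc c rest hc1 hc2 ih =>
    intro _
    have h2 : pvF (c :: rest) temp acc = pvF rest (temp ++ [c]) acc := by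
      simp [pvF, hc2]
    rw [h2]
    apply ih
    rw [pvEndswith_append_singleton]
    intro hx
    exact absurd (by simpa using hx) hc1

theorem pvF_eq_BLoop (cs : List Char) : ∀ (rcur temp : List Char) (acc : List String),
    pvF cs (temp ++ rcur.reverse) acc =
      pvBLoop (pvModDot rcur cs).tail (temp ++ (pvModDot rcur cs).headI) acc := by
  induction cs with
  | nil => intro rcur temp acc; simp [pvF, pvModDot, pvBLoop]
  | cons c rest ih =>
    intro rcur temp acc
    by_cases hc : c = '.'
    · subst hc
      rw [pvModDot, if_pos rfl]
      obtain ⟨q, qs, hq⟩ := List.exists_cons_of_ne_nil (pvModDot_ne_nil ([] : List Char) rest)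
      rw [hq]
      simp only [List.tail_cons, List.headI_cons]
      rw [pvF, if_pos rfl, pvBLoop]
      by_cases hend : PySem.Chars.endswith (temp ++ rcur.reverse) [']'] = true
      · rw [if_pos hend, if_pos hend]
        have := ih [] (temp ++ rcur.reverse ++ ['.']) acc
        rw [hq] at this
        simpa using this
      · rw [if_neg hend, if_neg hend]
        by_cases hemp : (temp ++ rcur.reverse).isEmpty = true
        · rw [if_pos hemp, if_pos hemp]
          have := ih [] ([] : List Char) acc
          rw [hq] at this
          have h0 : temp ++ rcur.reverse = [] := by simpa using hemp
          rw [h0]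
          simpa using this
        · rw [if_neg hemp, if_neg hemp]
          have := ih [] ([] : List Char) (acc ++ [String.mk (temp ++ rcur.reverse)])
          rw [hq] at this
          simpa using this
    · rw [pvModDot, if_neg hc, pvF, if_neg hc]
      have := ih (c :: rcur) temp acc
      rw [show temp ++ (c :: rcur).reverse = temp ++ rcur.reverse ++ [c] by simp] at this
      exact this

-- ===== VERDICT (by name: the statement is the Claim_ definition above) =====
theorem split_sequence_for_Helm_spec : Claim_equal_split_sequence_for_Helm := by
  intro peptide _
  unfold Spec_split_sequence_for_Helm split_sequence_for_Helm split_sequence_for_Helm_alt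
  rw [pvSplitOn_eq_modDot]
  rw [pvA_eq_F _ _ _ (by simp [PySem.Chars.endswith])]
  have h := pvF_eq_BLoop (pvHelmPrep peptide) [] [] []
  simp only [List.reverse_nil, List.append_nil, List.nil_append] at h
  rw [h]
  obtain ⟨p, ps, hp⟩ := List.exists_cons_of_ne_nil (pvModDot_ne_nil [] (pvHelmPrep peptide))
  rw [hp]
  simp [pvBLoop, PySem.Chars.endswith]
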